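-- pv_equiv track=rewrite | github.com/mharrys/spam-filter | extract.py | remove_email_headers
-- ===== SOURCE A (Python) =====
-- def remove_email_headers(text, subject):
--     """Remove email headers from specified text.
--     """
--     new_text = ''
--     split_text = text.split('\n')
--     i = 0
--     n = len(split_text)
--     while i < n:
--         line = split_text[i]
--         i += 1
--         if line == '':
--             break
--         if subject and line.startswith('Subject:'):
--             new_text += line[9:] + '\n'
--     while i < n:
--         line = split_text[i]
--         i += 1
--         new_text += line + '\n'
--     return new_text
-- ===== SOURCE B (Python) =====
-- def remove_email_headers(text, subject):
--     """Remove email headers from specified text."""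
--     if text.startswith('\n'):
--         head, body, has_body = '', text[1:], True
--     else:
--         head, sep, body = text.partition('\n\n')
--         has_body = sep != ''
--     result = ''
--     if subject:
--         result = ''.join(l[9:] + '\n' for l in head.split('\n')
--                          if l.startswith('Subject:'))
--     if has_body:
--         result += body + '\n'
--     return result
-- ===== Notes on version B (the rewrite author's own statement) =====
-- stated objective: alternative
-- what changed: Instead of walking the split line list with a break-driven index loop, B searches the raw text once for the '\n\n' separator (str.partition, with a leading-'\n' special start), keeps the body as a raw substring that is never split into lines, and filters Subject lines out of the head substring only.
import Mathlib
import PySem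

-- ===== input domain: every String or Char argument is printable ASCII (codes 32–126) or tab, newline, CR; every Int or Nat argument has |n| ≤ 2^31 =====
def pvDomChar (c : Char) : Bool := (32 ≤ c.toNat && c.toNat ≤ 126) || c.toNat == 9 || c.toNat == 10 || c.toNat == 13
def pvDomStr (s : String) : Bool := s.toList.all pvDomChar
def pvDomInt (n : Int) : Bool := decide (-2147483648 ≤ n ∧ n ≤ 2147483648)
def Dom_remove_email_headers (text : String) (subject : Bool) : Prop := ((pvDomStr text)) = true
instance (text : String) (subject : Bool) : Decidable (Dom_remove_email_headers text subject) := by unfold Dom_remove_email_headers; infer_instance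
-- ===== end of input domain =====

-- B replaces A's break-driven walk over split lines by searching the raw text for the
-- '\n\n' separator (str.partition), keeping the body as a raw substring and filtering
-- Subject lines out of the head substring only (objective: alternative algorithm, same cost).

-- ===== PORT A =====
-- second while loop: append every remaining line + '\n'
def pvATail : List String → String → String
  | [], acc => acc
  | l :: rest, acc => pvATail rest (acc ++ (l ++ "\n"))

-- first while loop: until the blank line, collect subject bodies; on break, switch to the tail loop
def pvAHead (subject : Bool) : List String → String → String
  | [], acc => acc
  | l :: rest, acc =>
    if l = "" then pvATail rest acc
    else pvAHead subject rest
      (if subject && PySem.Str.startswith l "Subject:" then acc ++ (PySem.Str.slice l (some 9) none ++ "\n") else acc)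

def remove_email_headers (text : String) (subject : Bool) : String :=
  pvAHead subject ((PySem.Str.split? text "\n").getD []) ""

-- ===== PORT B =====
-- hand port of Python's str.partition(sep) for nonempty sep (exact: head before the FIRST
-- occurrence of sep, then sep, then the rest; (cs, '', '') when sep does not occur)
def pvPartitionC : List Char → List Char → List Char × List Char × List Char
  | [], _ => ([], [], [])
  | c :: t, sep =>
    if sep.isPrefixOf (c :: t) then ([], sep, (c :: t).drop sep.length)
    else
      let p := pvPartitionC t sep
      (c :: p.1, p.2.1, p.2.2)

def remove_email_headers_alt (text : String) (subject : Bool) : String :=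
  let hb : String × String × Bool :=
    if PySem.Str.startswith text "\n" then
      ("", PySem.Str.slice text (some 1) none, true)
    else
      let p := pvPartitionC text.toList ['\n', '\n']
      (String.ofList p.1, String.ofList p.2.2, !p.2.1.isEmpty)
  let subj : String :=
    if subject then
      PySem.Str.join "" ((((PySem.Str.split? hb.1 "\n").getD []).filter
          (fun l => PySem.Str.startswith l "Subject:")).map
          (fun l => PySem.Str.slice l (some 9) none ++ "\n"))
    else ""
  if hb.2.2 then subj ++ hb.2.1 ++ "\n" else subj

-- ===== PRECONDITION & SPEC =====
def Spec_remove_email_headers (text : String) (subject : Bool) (out : String) : Prop := out = remove_email_headers_alt text subject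
instance (text : String) (subject : Bool) (out : String) : Decidable (Spec_remove_email_headers text subject out) := by unfold Spec_remove_email_headers; infer_instance

-- ===== CLAIM (what is proved, stated in full; the proofs are below) =====
def Claim_equal_remove_email_headers : Prop := ∀ (text : String) (subject : Bool), Dom_remove_email_headers text subject → Spec_remove_email_headers text subject (remove_email_headers text subject)

-- ===== LEMMAS AND PROOFS =====

-- split by a single '\n', as a structural recursion
def pvSplitNl : List Char → List (List Char)
  | [] => [[]]
  | c :: r => if c = '\n' then [] :: pvSplitNl r else (pvSplitNl r).modifyHead (c :: ·)

-- the contribution of one header line in A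
def pvContrib (subject : Bool) (l : List Char) : List Char :=
  if subject && PySem.Chars.startswith l "Subject:".toList then
    PySem.Chars.slice l (some 9) none ++ ['\n'] else []

-- A's whole computation over the line list
def pvAC (subject : Bool) : List (List Char) → List Char
  | [] => []
  | l :: rest =>
    if l = [] then PySem.Chars.join [] (rest.map (· ++ ['\n']))
    else pvContrib subject l ++ pvAC subject rest

-- B's subject pass over the head's line list
def pvSubj (subject : Bool) (L : List (List Char)) : List Char :=
  if subject then
    PySem.Chars.join [] ((L.filter (fun l => PySem.Chars.startswith l "Subject:".toList)).map
      (fun l => PySem.Chars.slice l (some 9) none ++ ['\n']))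
  else []

-- B's whole computation at the char level
def pvBC (subject : Bool) (cs : List Char) : List Char :=
  let hb : List Char × List Char × Bool :=
    if PySem.Chars.startswith cs ['\n'] then ([], cs.tail, true)
    else
      let p := pvPartitionC cs ['\n', '\n']
      (p.1, p.2.2, !p.2.1.isEmpty)
  if hb.2.2 then pvSubj subject (pvSplitNl hb.1) ++ hb.2.1 ++ ['\n']
  else pvSubj subject (pvSplitNl hb.1)

theorem pvJoin_nil_cons (p : List Char) (rest : List (List Char)) :
    PySem.Chars.join [] (p :: rest) = p ++ PySem.Chars.join [] rest := by
  cases rest with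
  | nil => simp [PySem.Chars.join_singleton, PySem.Chars.join_nil]
  | cons q t => simp [PySem.Chars.join_cons_cons]

theorem pvSplitNl_cons_nl (r : List Char) : pvSplitNl ('\n' :: r) = [] :: pvSplitNl r := by
  simp [pvSplitNl]

theorem pvSplitNl_cons_ne (c : Char) (r : List Char) (hc : c ≠ '\n') :
    pvSplitNl (c :: r) = (pvSplitNl r).modifyHead (c :: ·) := by
  simp [pvSplitNl, hc]

theorem pvSplitNl_ne_nil (cs : List Char) : pvSplitNl cs ≠ [] := by
  induction cs with
  | nil => simp [pvSplitNl]
  | cons c r ih =>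
    simp only [pvSplitNl]
    split_ifs
    · simp
    · cases h : pvSplitNl r with
      | nil => exact absurd h ih
      | cons a t => simp

theorem pvSplitOn_go_eq (fuel : Nat) : ∀ (l cur : List Char) (acc : List (List Char)),
    l.length < fuel →
    PySem.Chars.splitOn.go ['\n'] fuel l cur acc
      = acc.reverse ++ (pvSplitNl l).modifyHead (cur.reverse ++ ·) := by
  induction fuel with
  | zero => intro l cur acc h; omega
  | succ fuel ih =>
    intro l cur acc h
    cases l with
    | nil => simp [PySem.Chars.splitOn.go, pvSplitNl]
    | cons c rest =>
      simp only [PySem.Chars.splitOn.go]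
      by_cases hc : c = '\n'
      · subst hc
        rw [if_pos (by simp [List.isPrefixOf])]
        rw [show List.drop ['\n'].length ('\n' :: rest) = rest from rfl]
        rw [ih rest [] (List.reverse cur :: acc) (by simpa using Nat.lt_of_succ_lt_succ h)]
        rw [pvSplitNl_cons_nl]
        cases hs : pvSplitNl rest with
        | nil => exact absurd hs (pvSplitNl_ne_nil rest)
        | cons a t => simp
      · have hc' : ¬ ('\n' = c) := fun e => hc e.symm
        rw [if_neg (by simp [List.isPrefixOf, hc'])]
        rw [ih rest (c :: cur) acc (by simpa using Nat.lt_of_succ_lt_succ h)]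
        rw [pvSplitNl_cons_ne c rest hc]
        cases hs : pvSplitNl rest with
        | nil => exact absurd hs (pvSplitNl_ne_nil rest)
        | cons a t => simp

theorem pvSplitOn_eq (cs : List Char) : PySem.Chars.splitOn cs ['\n'] = pvSplitNl cs := by
  unfold PySem.Chars.splitOn
  rw [pvSplitOn_go_eq (cs.length + 1) cs [] [] (by omega)]
  cases hs : pvSplitNl cs with
  | nil => exact absurd hs (pvSplitNl_ne_nil cs)
  | cons a t => simp

theorem pvSplitNl_noNl (cs : List Char) (h : '\n' ∉ cs) : pvSplitNl cs = [cs] := by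
  induction cs with
  | nil => rfl
  | cons c r ih =>
    have hc : c ≠ '\n' := fun e => h (e ▸ List.mem_cons_self)
    simp only [pvSplitNl, if_neg hc, ih (fun m => h (List.mem_cons_of_mem _ m))]
    rfl

theorem pvSplitNl_app (l rest : List Char) (h : '\n' ∉ l) :
    pvSplitNl (l ++ '\n' :: rest) = l :: pvSplitNl rest := by
  induction l with
  | nil => simp [pvSplitNl]
  | cons c t ih =>
    have hc : c ≠ '\n' := fun e => h (e ▸ List.mem_cons_self)
    simp only [List.cons_append, pvSplitNl, if_neg hc,
      ih (fun m => h (List.mem_cons_of_mem _ m))]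
    rfl

theorem pvJoin_splitNl (cs : List Char) :
    PySem.Chars.join [] ((pvSplitNl cs).map (· ++ ['\n'])) = cs ++ ['\n'] := by
  induction cs with
  | nil => simp [pvSplitNl, PySem.Chars.join_singleton]
  | cons c r ih =>
    by_cases hc : c = '\n'
    · subst hc
      rw [pvSplitNl_cons_nl, List.map_cons, pvJoin_nil_cons]
      simp [ih]
    · rw [pvSplitNl_cons_ne c r hc]
      cases hs : pvSplitNl r with
      | nil => exact absurd hs (pvSplitNl_ne_nil r)
      | cons a t =>
        rw [hs] at ih
        simp only [List.modifyHead_cons, List.map_cons, pvJoin_nil_cons] at *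
        simp [← ih]

theorem pvPartitionC_noNl (cs : List Char) (h : '\n' ∉ cs) :
    pvPartitionC cs ['\n', '\n'] = (cs, [], []) := by
  induction cs with
  | nil => rfl
  | cons c t ih =>
    have hc : c ≠ '\n' := fun e => h (e ▸ List.mem_cons_self)
    have hc' : ¬ ('\n' = c) := fun e => hc e.symm
    simp only [pvPartitionC, List.isPrefixOf]
    rw [if_neg (by simp [hc'])]
    simp [ih (fun m => h (List.mem_cons_of_mem _ m))]

theorem pvPartitionC_app (l rest : List Char) (h : '\n' ∉ l) :
    pvPartitionC (l ++ '\n' :: rest) ['\n', '\n'] =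
      if PySem.Chars.startswith rest ['\n'] then (l, ['\n', '\n'], rest.tail)
      else (l ++ '\n' :: (pvPartitionC rest ['\n', '\n']).1,
            (pvPartitionC rest ['\n', '\n']).2.1, (pvPartitionC rest ['\n', '\n']).2.2) := by
  induction l with
  | nil =>
    simp only [List.nil_append, pvPartitionC, List.isPrefixOf, PySem.Chars.startswith]
    by_cases hr : List.isPrefixOf ['\n'] rest
    · rw [if_pos (by simp [hr]), if_pos hr]
      cases rest with
      | nil => simp [List.isPrefixOf] at hr
      | cons a t => simp
    · rw [if_neg (by simp [hr]), if_neg hr]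
  | cons c t ih =>
    have hc : c ≠ '\n' := fun e => h (e ▸ List.mem_cons_self)
    have hc' : ¬ ('\n' = c) := fun e => hc e.symm
    have ht := ih (fun m => h (List.mem_cons_of_mem _ m))
    simp only [List.cons_append, pvPartitionC, List.isPrefixOf]
    rw [if_neg (by simp [hc'])]
    rw [ht]
    split_ifs <;> simp

theorem pvSubj_nil (subject : Bool) : pvSubj subject [] = [] := by
  cases subject <;> simp [pvSubj, PySem.Chars.join_nil]

theorem pvSubj_cons (subject : Bool) (l : List Char) (L : List (List Char)) :
    pvSubj subject (l :: L) = pvContrib subject l ++ pvSubj subject L := by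
  unfold pvSubj pvContrib
  cases subject with
  | false => simp
  | true =>
    simp only [Bool.true_and]
    rw [List.filter_cons]
    simp only [show ("Subject:".toList) = ['S','u','b','j','e','c','t',':'] from rfl]
    by_cases hs : PySem.Chars.startswith l ['S','u','b','j','e','c','t',':'] = true
    · simp [hs, pvJoin_nil_cons]
    · simp [hs]

theorem pvContrib_nil (subject : Bool) : pvContrib subject [] = [] := by
  cases subject <;> simp [pvContrib, PySem.Chars.startswith, List.isPrefixOf]

theorem pvSubj_single (subject : Bool) (l : List Char) :
    pvSubj subject [l] = pvContrib subject l := by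
  rw [show ([l] : List (List Char)) = l :: [] from rfl, pvSubj_cons, pvSubj_nil,
    List.append_nil]

theorem pvAC_cons_blank (subject : Bool) (L : List (List Char)) :
    pvAC subject ([] :: L) = PySem.Chars.join [] (L.map (· ++ ['\n'])) := by
  simp [pvAC]

theorem pvAC_cons_ne (subject : Bool) (l : List Char) (L : List (List Char)) (h : l ≠ []) :
    pvAC subject (l :: L) = pvContrib subject l ++ pvAC subject L := by
  simp [pvAC, h]

theorem pvBC_cons_nl (subject : Bool) (r : List Char) :
    pvBC subject ('\n' :: r) = r ++ ['\n'] := by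
  unfold pvBC
  rw [if_pos (show PySem.Chars.startswith ('\n' :: r) ['\n'] = true by
    simp [PySem.Chars.startswith, List.isPrefixOf])]
  simp only [List.tail_cons, if_pos rfl]
  rw [show pvSplitNl [] = [[]] from rfl]
  rw [show ([([] : List Char)] : List (List Char)) = [] :: [] from rfl, pvSubj_cons,
    pvContrib_nil, pvSubj_nil]
  simp

theorem pvBC_no_nl (subject : Bool) (cs : List Char)
    (h : PySem.Chars.startswith cs ['\n'] = false) :
    pvBC subject cs =
      if !(pvPartitionC cs ['\n', '\n']).2.1.isEmpty then
        pvSubj subject (pvSplitNl (pvPartitionC cs ['\n', '\n']).1)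
          ++ (pvPartitionC cs ['\n', '\n']).2.2 ++ ['\n']
      else pvSubj subject (pvSplitNl (pvPartitionC cs ['\n', '\n']).1) := by
  unfold pvBC
  rw [h]
  simp

-- decompose a list at its FIRST newline
theorem pv_first_nl : ∀ (r : List Char), '\n' ∈ r →
    ∃ l rest, r = l ++ '\n' :: rest ∧ '\n' ∉ l := by
  intro r
  induction r with
  | nil => simp
  | cons c t ih =>
    intro h
    by_cases hc : c = '\n'
    · exact ⟨[], t, by simp [hc], by simp⟩
    · have ht : '\n' ∈ t := by
        rcases List.mem_cons.mp h with h1 | h1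
        · exact absurd h1.symm hc
        · exact h1
      obtain ⟨l, rest, hd, hn⟩ := ih ht
      refine ⟨c :: l, rest, by simp [hd], ?_⟩
      intro m
      rcases List.mem_cons.mp m with h1 | h1
      · exact hc h1.symm
      · exact hn h1

-- the master equivalence at the char level
theorem pvMaster (subject : Bool) : ∀ (n : Nat) (cs : List Char), cs.length ≤ n →
    pvAC subject (pvSplitNl cs) = pvBC subject cs := by
  intro n
  induction n with
  | zero =>
    intro cs h
    have hcs : cs = [] := List.eq_nil_of_length_eq_zero (Nat.le_zero.mp h)
    subst hcs
    rw [show pvSplitNl [] = [[]] from rfl, pvAC_cons_blank,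
      pvBC_no_nl subject [] (by simp [PySem.Chars.startswith, List.isPrefixOf]),
      show pvPartitionC [] ['\n', '\n'] = ([], [], []) from rfl]
    simp only [List.isEmpty_nil, Bool.not_true, Bool.false_eq_true, if_false]
    rw [show pvSplitNl [] = [[]] from rfl, pvSubj_single, pvContrib_nil]
    simp [PySem.Chars.join_nil]
  | succ n ih =>
    intro cs hlen
    by_cases hnl : '\n' ∈ cs
    · cases cs with
      | nil => simp at hnl
      | cons c r =>
        by_cases hc : c = '\n'
        · -- blank first line: body is the tail
          subst hc
          rw [pvSplitNl_cons_nl, pvAC_cons_blank, pvJoin_splitNl, pvBC_cons_nl]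
        · -- nonempty first line l, then '\n', then rest
          obtain ⟨l, rest, hdec, hlnl⟩ := pv_first_nl (c :: r) hnl
          have hlne : l ≠ [] := by
            intro e
            rw [e, List.nil_append] at hdec
            exact hc (List.cons_eq_cons.mp hdec).1
          rw [hdec]
          have hlen' : rest.length ≤ n := by
            rw [hdec] at hlen
            simp at hlen
            omega
          -- A side
          rw [pvSplitNl_app l rest hlnl, pvAC_cons_ne subject l _ hlne, ih rest hlen']
          -- B side
          have hsw : PySem.Chars.startswith (l ++ '\n' :: rest) ['\n'] = false := by
            cases l with
            | nil => exact absurd rfl hlne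
            | cons a t =>
              have ha : ¬ ('\n' = a) := fun e => hlnl (e ▸ List.mem_cons_self)
              simp [PySem.Chars.startswith, List.isPrefixOf, ha]
          rw [pvBC_no_nl subject _ hsw, pvPartitionC_app l rest hlnl]
          by_cases hrs : PySem.Chars.startswith rest ['\n'] = true
          · -- rest starts with '\n': separator found right after l
            rw [if_pos hrs]
            obtain ⟨t, ht⟩ : ∃ t, rest = '\n' :: t := by
              cases rest with
              | nil => simp [PySem.Chars.startswith, List.isPrefixOf] at hrs
              | cons a u =>
                simp only [PySem.Chars.startswith, List.isPrefixOf, Bool.and_eq_true,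
                  beq_iff_eq] at hrs
                exact ⟨u, by rw [hrs.1]⟩
            rw [ht]
            simp only [List.tail_cons, List.isEmpty_cons, Bool.not_false, if_pos rfl]
            rw [pvSplitNl_noNl l hlnl, pvSubj_single, pvBC_cons_nl]
            simp [List.append_assoc]
          · -- separator (if any) is inside rest
            rw [if_neg hrs]
            have hrs' : PySem.Chars.startswith rest ['\n'] = false := by
              simpa using hrs
            rw [pvBC_no_nl subject rest hrs']
            simp only
            rw [pvSplitNl_app l (pvPartitionC rest ['\n', '\n']).1 hlnl, pvSubj_cons]
            split_ifs with hb
            · simp [List.append_assoc]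
            · simp
    · -- no newline at all: everything is headers, no body
      rw [pvSplitNl_noNl cs hnl]
      have hsw : PySem.Chars.startswith cs ['\n'] = false := by
        cases cs with
        | nil => simp [PySem.Chars.startswith, List.isPrefixOf]
        | cons a t =>
          have hc : ¬ ('\n' = a) := fun e => hnl (e ▸ List.mem_cons_self)
          simp [PySem.Chars.startswith, List.isPrefixOf, hc]
      rw [pvBC_no_nl subject cs hsw, pvPartitionC_noNl cs hnl]
      simp only [List.isEmpty_nil, Bool.not_true, Bool.false_eq_true, if_false]
      rw [pvSplitNl_noNl cs hnl, pvSubj_single]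
      cases hcs : cs with
      | nil => rw [pvContrib_nil]; simp [pvAC, PySem.Chars.join_nil]
      | cons a t =>
        rw [pvAC_cons_ne subject _ _ (by simp)]
        simp [pvAC]

-- bridges: both ports compute pvAC / pvBC on the char level
theorem pvATail_toList (rest : List String) (acc : String) :
    (pvATail rest acc).toList
      = acc.toList ++ PySem.Chars.join [] ((rest.map String.toList).map (· ++ ['\n'])) := by
  induction rest generalizing acc with
  | nil => simp [pvATail, PySem.Chars.join_nil]
  | cons l t ih => simp [pvATail, ih, pvJoin_nil_cons]

theorem pvAHead_toList (subject : Bool) (lines : List String) (acc : String) :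
    (pvAHead subject lines acc).toList
      = acc.toList ++ pvAC subject (lines.map String.toList) := by
  induction lines generalizing acc with
  | nil => simp [pvAHead, pvAC]
  | cons l rest ih =>
    by_cases h : l = ""
    · subst h
      simp [pvAHead, pvATail_toList, pvAC]
    · have h' : l.toList ≠ [] := by
        simpa using (String.toList_inj.ne.mpr h)
      rw [pvAHead.eq_def]
      simp only []
      rw [if_neg h, ih]
      simp only [List.map_cons]
      rw [pvAC_cons_ne subject _ _ h']
      unfold pvContrib
      by_cases hc : (subject && PySem.Str.startswith l "Subject:") = true
      · rw [if_pos hc,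
          if_pos (show (subject && PySem.Chars.startswith l.toList "Subject:".toList) = true from hc)]
        simp [PySem.Str.toList_slice, List.append_assoc]
      · rw [if_neg hc,
          if_neg (show ¬ (subject && PySem.Chars.startswith l.toList "Subject:".toList) = true from hc)]
        simp

theorem pvLines_toList (s : String) :
    ((PySem.Str.split? s "\n").getD []).map String.toList = pvSplitNl s.toList := by
  rw [← pvSplitOn_eq]
  simp [PySem.Str.split?, PySem.Chars.split?, List.map_map, Function.comp_def]

theorem pvA_toList (text : String) (subject : Bool) :
    (remove_email_headers text subject).toList = pvAC subject (pvSplitNl text.toList) := by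
  unfold remove_email_headers
  rw [pvAHead_toList, pvLines_toList]
  simp

theorem pvStrJoin_cons (p : String) (rest : List String) :
    PySem.Str.join "" (p :: rest) = p ++ PySem.Str.join "" rest := by
  rw [← String.toList_inj]
  simp [PySem.Str.toList_join, pvJoin_nil_cons]

theorem pvSubjL (L : List String) :
    (PySem.Str.join "" ((L.filter (fun l => PySem.Str.startswith l "Subject:")).map
        (fun l => PySem.Str.slice l (some 9) none ++ "\n"))).toList
    = PySem.Chars.join [] (((L.map String.toList).filter
          (fun l => PySem.Chars.startswith l "Subject:".toList)).map
        (fun l => PySem.Chars.slice l (some 9) none ++ ['\n'])) := by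
  induction L with
  | nil => simp [PySem.Str.toList_join, PySem.Chars.join_nil]
  | cons l t ih =>
    rw [List.map_cons, List.filter_cons, List.filter_cons]
    by_cases hc : PySem.Str.startswith l "Subject:" = true
    · rw [if_pos hc,
        if_pos (show PySem.Chars.startswith l.toList "Subject:".toList = true from hc)]
      rw [List.map_cons, List.map_cons, pvStrJoin_cons, pvJoin_nil_cons,
        String.toList_append, ih, String.toList_append, PySem.Str.toList_slice]
      rfl
    · rw [if_neg hc,
        if_neg (show ¬ PySem.Chars.startswith l.toList "Subject:".toList = true from hc)]
      exact ih

theorem pvSubjStr_toList (subject : Bool) (s : String) :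
    (if subject then
        PySem.Str.join "" ((((PySem.Str.split? s "\n").getD []).filter
            (fun l => PySem.Str.startswith l "Subject:")).map
            (fun l => PySem.Str.slice l (some 9) none ++ "\n"))
      else "").toList
    = pvSubj subject (pvSplitNl s.toList) := by
  cases subject with
  | false => simp [pvSubj]
  | true =>
    simp only [if_true]
    unfold pvSubj
    simp only [if_true]
    rw [pvSubjL, pvLines_toList]

theorem pvB_toList (text : String) (subject : Bool) :
    (remove_email_headers_alt text subject).toList = pvBC subject text.toList := by
  unfold remove_email_headers_alt pvBC
  by_cases h : PySem.Str.startswith text "\n" = true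
  · rw [if_pos h,
      if_pos (show PySem.Chars.startswith text.toList ['\n'] = true from h)]
    simp only [if_true]
    rw [String.toList_append, String.toList_append, pvSubjStr_toList]
    rw [show ("" : String).toList = ([] : List Char) from rfl]
    simp [PySem.Str.toList_slice, PySem.List.slice_from_one]
  · rw [if_neg h,
      if_neg (show ¬ PySem.Chars.startswith text.toList ['\n'] = true from h)]
    simp only []
    by_cases hb : (!(pvPartitionC text.toList ['\n', '\n']).2.1.isEmpty) = true
    · rw [if_pos hb, if_pos hb]
      rw [String.toList_append, String.toList_append, pvSubjStr_toList]
      simp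
    · rw [if_neg hb, if_neg hb]
      rw [pvSubjStr_toList]
      simp

-- ===== VERDICT (by name: the statement is the Claim_ definition above) =====
theorem remove_email_headers_spec : Claim_equal_remove_email_headers := by
  intro text subject _
  unfold Spec_remove_email_headers
  rw [← String.toList_inj, pvA_toList, pvB_toList,
    pvMaster subject text.toList.length text.toList (le_refl _)]
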